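-- pv_equiv track=rewrite | github.com/juanda9709/Crypto_Forecasting- | modelling/app.py | _param_grid_to_custom_format
-- ===== SOURCE A (Python) =====
-- def _param_grid_to_custom_format(param_grid):
--     grid = {}
--     for name, values in param_grid.items():
--         estimator_name, param_name = name.split("__", maxsplit=1)
--         if estimator_name not in grid:
--             grid[estimator_name] = {}
--         grid[estimator_name][param_name] = values
--     return grid
-- ===== SOURCE B (Python) =====
-- def _param_grid_to_custom_format(param_grid):
--     split_items = [(name.split("__", maxsplit=1), values)
--                    for name, values in param_grid.items()]
--     estimators = []
--     for (estimator_name, _), _ in split_items: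
--         if estimator_name not in estimators:
--             estimators.append(estimator_name)
--     return {est: {param: values for (e, param), values in split_items if e == est}
--             for est in estimators}
-- ===== Notes on version B (the rewrite author's own statement) =====
-- stated objective: alternative
-- what changed: Replaces A's incremental single-pass nested-dict grouping with a two-phase decomposition: pre-split every key once, collect the distinct estimator prefixes in first-appearance order, then build each estimator's inner dict by a per-estimator comprehension over the pre-split items.
import Mathlib
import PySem

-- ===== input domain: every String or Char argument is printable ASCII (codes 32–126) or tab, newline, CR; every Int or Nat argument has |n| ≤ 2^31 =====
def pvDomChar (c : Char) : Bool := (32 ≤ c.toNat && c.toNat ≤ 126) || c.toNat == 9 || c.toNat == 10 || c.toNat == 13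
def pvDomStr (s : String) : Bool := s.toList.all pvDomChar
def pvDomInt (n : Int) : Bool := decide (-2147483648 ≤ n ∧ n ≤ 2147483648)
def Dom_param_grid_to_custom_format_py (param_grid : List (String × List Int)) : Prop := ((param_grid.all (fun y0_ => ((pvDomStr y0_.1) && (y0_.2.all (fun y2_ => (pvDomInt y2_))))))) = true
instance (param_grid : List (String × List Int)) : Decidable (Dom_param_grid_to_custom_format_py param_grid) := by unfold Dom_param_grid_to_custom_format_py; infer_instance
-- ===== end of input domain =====

-- B regroups the flat grid in two explicit phases (collect the distinct estimator
-- prefixes, then build each estimator's inner dict by a per-estimator scan of the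
-- pre-split items) instead of A's incremental single-pass hash grouping; objective:
-- alternative decomposition, same result.

-- ===== PORT A =====
-- literal transliteration of A: one pass, nested dict built incrementally
def param_grid_to_custom_format_py (param_grid : List (String × List Int)) : List (String × List (String × List Int)) :=
  let grid : PySem.Dict String (PySem.Dict String (List Int)) :=
    param_grid.foldl (fun grid kv =>
      match PySem.Str.splitMax? kv.1 "__" 1 with
      | some [estimator_name, param_name] =>
        -- 'if estimator_name not in grid: grid[estimator_name] = {}'
        let grid := if grid.contains estimator_name then grid else grid.insert estimator_name PySem.Dict.empty
        -- 'grid[estimator_name][param_name] = values'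
        grid.insert estimator_name ((grid.getD estimator_name PySem.Dict.empty).insert param_name kv.2)
      | _ => grid   -- Python raises ValueError here (key without "__"); outside Pre_
      ) PySem.Dict.empty
  grid.items.map (fun q => (q.1, q.2.items))

-- ===== PORT B =====
-- B-side helper: the '(estimator_name, param_name), values' unpacking of a split
-- result (none = the ValueError Python raises on a list that is not a pair)
def pvUnpack2 (ss : List String) : Option (String × String) :=
  if h : ss.length = 2 then some (ss[0]'(by omega), ss[1]'(by omega)) else none

-- literal transliteration of Source B: pre-split all items, collect distinct estimator
-- names in order, then build each inner dict by scanning the split items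
def param_grid_to_custom_format_py_alt (param_grid : List (String × List Int)) : List (String × List (String × List Int)) :=
  let split_items : List (List String × List Int) :=
    param_grid.map (fun kv => ((PySem.Str.splitMax? kv.1 "__" 1).getD [], kv.2))
  let estimators : PySem.Set String :=
    split_items.foldl (fun acc x =>
      match pvUnpack2 x.1 with
      | some (estimator_name, _) => PySem.Set.add acc estimator_name
      | none => acc   -- Python raises ValueError here; outside Pre_
      ) []
  estimators.map (fun est =>
    (est, (split_items.foldl (fun d x =>
            match pvUnpack2 x.1 with
            | some (e, param) => if e == est then d.insert param x.2 else d
            | none => d) (PySem.Dict.empty : PySem.Dict String (List Int))).items))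

-- ===== PRECONDITION & SPEC =====
-- Pre_ requires every key to contain "__" (otherwise Python A raises ValueError on
-- unpacking the split) and the keys to be pairwise distinct (the argument is a Python
-- dict, which cannot hold duplicate keys; an assoc list with duplicates corresponds
-- to no dict input — Python collapses it before A runs).
def Pre_param_grid_to_custom_format_py (param_grid : List (String × List Int)) : Prop :=
  (param_grid.all (fun kv => PySem.Str.isIn "__" kv.1)) = true ∧ (param_grid.map Prod.fst).Nodup
instance (param_grid : List (String × List Int)) : Decidable (Pre_param_grid_to_custom_format_py param_grid) := by unfold Pre_param_grid_to_custom_format_py; infer_instance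

def pvWitness_param_grid_to_custom_format_py : (List (String × List Int)) :=
  [("rf__n_estimators", [50, 100]), ("svm__C", [1]), ("rf__max_depth", [3, 5])]

def Spec_param_grid_to_custom_format_py (param_grid : List (String × List Int)) (out : List (String × List (String × List Int))) : Prop := out = param_grid_to_custom_format_py_alt param_grid
instance (param_grid : List (String × List Int)) (out : List (String × List (String × List Int))) : Decidable (Spec_param_grid_to_custom_format_py param_grid out) := by unfold Spec_param_grid_to_custom_format_py; infer_instance

-- ===== CLAIM (what is proved, stated in full; the proofs are below) =====
def Claim_equal_param_grid_to_custom_format_py : Prop := ∀ (param_grid : List (String × List Int)), Dom_param_grid_to_custom_format_py param_grid → Pre_param_grid_to_custom_format_py param_grid → Spec_param_grid_to_custom_format_py param_grid (param_grid_to_custom_format_py param_grid)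

-- ===== LEMMAS AND PROOFS =====

theorem param_grid_to_custom_format_py_witness_ok :
    Dom_param_grid_to_custom_format_py pvWitness_param_grid_to_custom_format_py ∧
    Pre_param_grid_to_custom_format_py pvWitness_param_grid_to_custom_format_py := by decide

def pvSplitFirst (sep : List Char) : List Char → Option (List Char × List Char)
  | [] => none
  | c :: rest =>
    if sep.isPrefixOf (c :: rest) then some ([], (c :: rest).drop sep.length)
    else (pvSplitFirst sep rest).map (fun ab => (c :: ab.1, ab.2))

theorem pv_go_zero (sep : List Char) (fuel : Nat) (l cur : List Char) (acc : List (List Char)) :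
    PySem.Chars.splitOnMax.go sep (fuel+1) 0 l cur acc = ((cur.reverse ++ l) :: acc).reverse := by
  cases l <;> simp [PySem.Chars.splitOnMax.go]

theorem pv_go_one (sep : List Char) : ∀ (fuel : Nat) (l : List Char), l.length ≤ fuel →
    ∀ (cur : List Char) (acc : List (List Char)),
    PySem.Chars.splitOnMax.go sep (fuel+1) 1 l cur acc =
      (match pvSplitFirst sep l with
       | some (a, b) => acc.reverse ++ [cur.reverse ++ a, b]
       | none => acc.reverse ++ [cur.reverse ++ l]) := by
  intro fuel
  induction fuel with
  | zero =>
    intro l hl cur acc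
    have : l = [] := List.eq_nil_of_length_eq_zero (Nat.le_zero.mp hl)
    subst this
    simp [PySem.Chars.splitOnMax.go, pvSplitFirst]
  | succ f ih =>
    intro l hl cur acc
    cases l with
    | nil => simp [PySem.Chars.splitOnMax.go, pvSplitFirst]
    | cons c rest =>
      by_cases hp : sep.isPrefixOf (c :: rest)
      · simp only [PySem.Chars.splitOnMax.go, hp, if_true, pvSplitFirst]
        rw [pv_go_zero]
        simp
      · simp only [PySem.Chars.splitOnMax.go, hp, pvSplitFirst]
        rw [ih rest (by simpa using Nat.le_of_succ_le_succ hl)]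
        cases h : pvSplitFirst sep rest with
        | none => simp
        | some ab => cases ab with | mk a b => simp

theorem pvSplitFirst_some (sep : List Char) : ∀ (l a b : List Char),
    pvSplitFirst sep l = some (a, b) → l = a ++ sep ++ b := by
  intro l
  induction l with
  | nil => intro a b h; simp [pvSplitFirst] at h
  | cons c rest ih =>
    intro a b h
    by_cases hp : sep.isPrefixOf (c :: rest)
    · simp only [pvSplitFirst, hp, if_true, Option.some.injEq] at h
      obtain ⟨ha, hb⟩ := Prod.mk.injEq .. ▸ h
      obtain ⟨sfx, hsfx⟩ := (List.isPrefixOf_iff_prefix.mp hp)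
      subst ha
      simp only [← hb, ← hsfx]
      simp
    · cases hx : pvSplitFirst sep rest with
      | none => simp [pvSplitFirst, hp, hx] at h
      | some ab =>
        simp only [pvSplitFirst, hp] at h
        rw [hx] at h
        simp only [Option.map_some] at h
        simp at h
        obtain ⟨ha, hb⟩ := h
        subst ha; subst hb
        simp [ih ab.1 ab.2 hx]

theorem pvSplitFirst_isSome (sep : List Char) (hsep : sep ≠ []) : ∀ (l : List Char),
    sep <:+: l → (pvSplitFirst sep l).isSome := by
  intro l
  induction l with
  | nil => intro h; exact absurd (List.eq_nil_of_infix_nil h) hsep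
  | cons c rest ih =>
    intro h
    by_cases hp : sep.isPrefixOf (c :: rest)
    · simp [pvSplitFirst, hp]
    · rcases List.infix_cons_iff.mp h with h1 | h2
      · exact absurd (List.isPrefixOf_iff_prefix.mpr h1) hp
      · have := ih h2
        simp only [pvSplitFirst, hp]
        cases hx : pvSplitFirst sep rest with
        | none => rw [hx] at this; simp at this
        | some ab => simp

-- characterization of name.split("__", maxsplit=1) on names containing "__"
theorem pv_splitMax_char (s : String) (h : PySem.Str.isIn "__" s = true) :
    ∃ a b : List Char,
      PySem.Str.splitMax? s "__" 1 = some [String.ofList a, String.ofList b] ∧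
      s.toList = a ++ "__".toList ++ b := by
  have hinf : ("__".toList) <:+: s.toList := by
    by_contra hc
    have hne : PySem.Chars.find s.toList "__".toList ≠ -1 := by
      simpa [PySem.Str.isIn, PySem.Chars.isIn] using h
    apply hne
    have := (PySem.Chars.findFrom_natCast_eq_neg_one_iff s.toList "__".toList 0 (by simp)).mpr
      (by simpa using hc)
    simpa [PySem.Chars.findFrom_zero] using this
  obtain ⟨⟨a, b⟩, hab⟩ := Option.isSome_iff_exists.mp (pvSplitFirst_isSome "__".toList (by decide) s.toList hinf)
  refine ⟨a, b, ?_, ?_⟩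
  · have hgo : PySem.Chars.splitOnMax s.toList "__".toList 1 = [a, b] := by
      have : PySem.Chars.splitOnMax s.toList "__".toList 1 =
          PySem.Chars.splitOnMax.go "__".toList (s.toList.length + 1) 1 s.toList [] [] := by
        simp [PySem.Chars.splitOnMax]
      rw [this, pv_go_one _ _ _ (le_refl _), hab]
      simp
    simp only [PySem.Str.splitMax?, PySem.Chars.splitMax?]
    rw [show (("__" : String).toList) = ['_', '_'] from rfl] at hgo
    simp [hgo]
  · exact pvSplitFirst_some _ _ _ _ hab

-- abbreviations for the grouping argument (trips = parsed (estimator, param, values) triples)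
def pvStepT (grid : PySem.Dict String (PySem.Dict String (List Int)))
    (t : String × String × List Int) : PySem.Dict String (PySem.Dict String (List Int)) :=
  let grid := if grid.contains t.1 then grid else grid.insert t.1 PySem.Dict.empty
  grid.insert t.1 ((grid.getD t.1 PySem.Dict.empty).insert t.2.1 t.2.2)

def pvEsts (trips : List (String × String × List Int)) : PySem.Set String :=
  PySem.Set.ofList (trips.map (·.1))

def pvPf (trips : List (String × String × List Int)) (e : String) : List (String × List Int) :=
  (trips.filter (fun t => t.1 == e)).map (fun t => (t.2.1, t.2.2))

theorem pv_A_main : ∀ (trips : List (String × String × List Int)),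
    (trips.map (fun t => (t.1, t.2.1))).Nodup →
    (trips.foldl pvStepT PySem.Dict.empty).items =
      (pvEsts trips).map (fun e => (e, PySem.Dict.mk (pvPf trips e))) := by
  intro trips
  induction trips using List.reverseRecOn with
  | nil => simp [pvEsts, pvPf, PySem.Set.ofList]; rfl
  | append_singleton ts t ih =>
    intro hnd
    have hndts : (ts.map (fun t => (t.1, t.2.1))).Nodup := by
      rw [List.map_append] at hnd; exact hnd.sublist (List.sublist_append_left _ _)
    have hit := ih hndts
    set D := ts.foldl pvStepT PySem.Dict.empty with hD
    have hkeys : D.keys = pvEsts ts := by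
      show D.items.map (·.1) = _
      rw [hit]; simp [Function.comp_def]
    have hkeysnd : D.keys.Nodup := by rw [hkeys]; exact PySem.Set.nodup_ofList _
    have hcontains : D.contains t.1 = true ↔ t.1 ∈ ts.map (·.1) := by
      rw [PySem.Dict.contains_iff_mem_keys, hkeys, pvEsts, PySem.Set.mem_ofList]
    rw [List.foldl_append, List.foldl_cons, List.foldl_nil]
    by_cases he : t.1 ∈ ts.map (·.1)
    · -- estimator already present
      have hc : D.contains t.1 = true := hcontains.mpr he
      have hmem : (t.1, PySem.Dict.mk (pvPf ts t.1)) ∈ D.items := by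
        rw [hit]
        exact List.mem_map.mpr ⟨t.1, (PySem.Set.mem_ofList _ _).mpr he, rfl⟩
      have hgetD : D.getD t.1 PySem.Dict.empty = PySem.Dict.mk (pvPf ts t.1) :=
        PySem.Dict.getD_of_mem_items D hmem hkeysnd _
      have hpfresh : (PySem.Dict.mk (pvPf ts t.1)).contains t.2.1 = false := by
        rw [PySem.Dict.contains_mk]
        by_contra hcc
        simp only [Bool.not_eq_false, List.any_eq_true] at hcc
        obtain ⟨p, hp, hpe⟩ := hcc
        obtain ⟨t', ht', hteq⟩ := List.mem_map.mp hp
        have ht'f := List.of_mem_filter ht'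
        have : (t.1, t.2.1) ∈ ts.map (fun t => (t.1, t.2.1)) := by
          refine List.mem_map.mpr ⟨t', List.mem_of_mem_filter ht', ?_⟩
          have h1 : t'.1 = t.1 := by simpa using ht'f
          have h2 : t'.2.1 = t.2.1 := by
            have := hteq ▸ hpe
            simpa [← hteq] using hpe
          simp [h1, h2]
        rw [List.map_append] at hnd
        have hdisj := (List.nodup_append.mp hnd).2.2
        exact hdisj _ this _ (List.mem_map.mpr ⟨t, by simp, rfl⟩) rfl
      have hstep : pvStepT D t = D.insert t.1 ((PySem.Dict.mk (pvPf ts t.1)).insert t.2.1 t.2.2) := by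
        simp [pvStepT, hc, hgetD]
      rw [hstep, PySem.Dict.items_insert_of_contains _ _ hc, hit]
      have hests : pvEsts (ts ++ [t]) = pvEsts ts := by
        simp only [pvEsts, List.map_append, List.map_cons, List.map_nil,
          PySem.Set.ofList_append_singleton]
        exact PySem.Set.add_of_mem ((PySem.Set.mem_ofList _ _).mpr he)
      rw [hests, List.map_map]
      refine List.map_congr_left ?_
      intro e hemem
      by_cases heq : e = t.1
      · subst heq
        simp only [Function.comp_apply, BEq.rfl, if_true]
        refine Prod.ext rfl ?_
        apply PySem.Dict.ext
        rw [PySem.Dict.items_insert_of_not_contains _ _ hpfresh]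
        simp [pvPf, List.filter_append]
      · have hbe : (e == t.1) = false := beq_false_of_ne heq
        have hpfe : pvPf (ts ++ [t]) e = pvPf ts e := by
          simp [pvPf, List.filter_append, beq_false_of_ne (Ne.symm heq)]
        simp [Function.comp_apply, hpfe]
        intro hh
        exact absurd hh heq
    · -- new estimator
      have hc : D.contains t.1 = false := by
        rw [← Bool.not_eq_true]; intro hcc; exact he (hcontains.mp hcc)
      have hstep : pvStepT D t = D.insert t.1 (PySem.Dict.mk [(t.2.1, t.2.2)]) := by
        show (if D.contains t.1 then D else D.insert t.1 PySem.Dict.empty).insert t.1 _ = _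
        rw [hc, if_neg (by simp)]
        rw [PySem.Dict.insert_insert_self]
        congr 1
        · rw [PySem.Dict.getD_insert_self]
          apply PySem.Dict.ext
          rw [PySem.Dict.items_insert_of_not_contains]
          · rfl
          · rfl
      rw [hstep, PySem.Dict.items_insert_of_not_contains _ _ hc, hit]
      have hests : pvEsts (ts ++ [t]) = pvEsts ts ++ [t.1] := by
        simp only [pvEsts, List.map_append, List.map_cons, List.map_nil,
          PySem.Set.ofList_append_singleton]
        exact PySem.Set.add_of_not_mem (fun hcc => he ((PySem.Set.mem_ofList _ _).mp hcc))
      rw [hests, List.map_append]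
      congr 1
      · refine List.map_congr_left ?_
        intro e hemem
        have heq : e ≠ t.1 := fun hh => he (hh ▸ (PySem.Set.mem_ofList _ _).mp hemem)
        have : pvPf (ts ++ [t]) e = pvPf ts e := by
          simp [pvPf, List.filter_append, beq_false_of_ne (Ne.symm heq)]
        rw [this]
      · have hnil : pvPf ts t.1 = [] := by
          simp only [pvPf, List.map_eq_nil_iff, List.filter_eq_nil_iff]
          intro t' ht' hbe
          exact he (List.mem_map.mpr ⟨t', ht', by simpa using hbe⟩)
        have hone : pvPf (ts ++ [t]) t.1 = [(t.2.1, t.2.2)] := by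
          rw [pvPf, List.filter_append, List.map_append]
          rw [show (ts.filter (fun t' => t'.1 == t.1)).map (fun t => (t.2.1, t.2.2)) = pvPf ts t.1 from rfl, hnil]
          simp
        simp [hone]

theorem pv_foldl_if_filter {α β : Type} (c : α → Bool) (g : β → α → β) :
    ∀ (l : List α) (init : β),
    l.foldl (fun d t => if c t then g d t else d) init = (l.filter c).foldl g init := by
  intro l
  induction l with
  | nil => intro init; rfl
  | cons x xs ih =>
    intro init
    by_cases hx : c x
    · simp [hx, ih]
    · simp [hx, ih]

theorem pv_B_inner (trips : List (String × String × List Int)) (e : String)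
    (hnd : (trips.map (fun t => (t.1, t.2.1))).Nodup) :
    (trips.foldl (fun d t => if t.1 == e then d.insert t.2.1 t.2.2 else d)
        (PySem.Dict.empty : PySem.Dict String (List Int))).items = pvPf trips e := by
  rw [pv_foldl_if_filter]
  have h1 : ((trips.filter (fun t => t.1 == e)).map (fun t => (t.1, t.2.1))).Nodup :=
    hnd.sublist (List.Sublist.map _ (List.filter_sublist))
  have hsnd : ((trips.filter (fun t => t.1 == e)).map (fun t => (t.1, t.2.1))).map Prod.snd
      = (trips.filter (fun t => t.1 == e)).map (fun t => t.2.1) := by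
    rw [List.map_map]; rfl
  have hndp : ((trips.filter (fun t => t.1 == e)).map (fun t => t.2.1)).Nodup := by
    rw [← hsnd]
    refine List.Nodup.map_on ?_ h1
    intro x hx y hy hxy
    obtain ⟨tx, htx, hxeq⟩ := List.mem_map.mp hx
    obtain ⟨ty, hty, hyeq⟩ := List.mem_map.mp hy
    have hxe : tx.1 = e := by simpa using List.of_mem_filter htx
    have hye : ty.1 = e := by simpa using List.of_mem_filter hty
    rw [← hxeq, ← hyeq] at hxy ⊢
    have hxy' : tx.2.1 = ty.2.1 := hxy
    simp [hxe, hye, hxy']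
  have hmain := PySem.Dict.items_foldl_insert_fresh (trips.filter (fun t => t.1 == e))
    (fun t => t.2.1) (fun t => t.2.2) PySem.Dict.empty (fun a _ => by simp) hndp
  rw [hmain]
  simp [pvPf]
  rfl
def pvKeyPair (name : String) : String × String :=
  match PySem.Str.splitMax? name "__" 1 with
  | some [e, p] => (e, p)
  | _ => ("", "")

def pvParse (kv : String × List Int) : String × String × List Int :=
  ((pvKeyPair kv.1).1, (pvKeyPair kv.1).2, kv.2)

theorem pv_split_eq (name : String) (h : PySem.Str.isIn "__" name = true) :
    PySem.Str.splitMax? name "__" 1 = some [(pvKeyPair name).1, (pvKeyPair name).2] ∧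
    name.toList = (pvKeyPair name).1.toList ++ "__".toList ++ (pvKeyPair name).2.toList := by
  obtain ⟨a, b, hs, hd⟩ := pv_splitMax_char name h
  have hk : pvKeyPair name = (String.ofList a, String.ofList b) := by
    rw [pvKeyPair, hs]
  refine ⟨by rw [hk, hs], ?_⟩
  rw [hk]
  simpa using hd

theorem pv_keyPair_inj (n1 n2 : String) (h1 : PySem.Str.isIn "__" n1 = true)
    (h2 : PySem.Str.isIn "__" n2 = true) (heq : pvKeyPair n1 = pvKeyPair n2) : n1 = n2 := by
  have d1 := (pv_split_eq n1 h1).2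
  have d2 := (pv_split_eq n2 h2).2
  have : n1.toList = n2.toList := by rw [d1, d2, heq]
  exact String.toList_inj.mp this

theorem pv_A_eq (pg : List (String × List Int))
    (hall : ∀ kv ∈ pg, PySem.Str.isIn "__" kv.1 = true)
    (hpairs : ((pg.map pvParse).map (fun t => (t.1, t.2.1))).Nodup) :
    param_grid_to_custom_format_py pg =
      (pvEsts (pg.map pvParse)).map (fun e => (e, pvPf (pg.map pvParse) e)) := by
  show ((pg.foldl _ PySem.Dict.empty).items.map _) = _
  have hfold : pg.foldl (fun grid kv =>
      match PySem.Str.splitMax? kv.1 "__" 1 with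
      | some [estimator_name, param_name] =>
        let grid := if grid.contains estimator_name then grid else grid.insert estimator_name PySem.Dict.empty
        grid.insert estimator_name ((grid.getD estimator_name PySem.Dict.empty).insert param_name kv.2)
      | _ => grid) PySem.Dict.empty
      = (pg.map pvParse).foldl pvStepT PySem.Dict.empty := by
    rw [List.foldl_map]
    refine PySem.List.foldl_congr_mem _ _ _ _ ?_
    intro acc kv hkv
    rw [(pv_split_eq kv.1 (hall kv hkv)).1]
    rfl
  rw [hfold, pv_A_main _ hpairs, List.map_map]
  rfl

theorem pv_B_eq (pg : List (String × List Int))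
    (hall : ∀ kv ∈ pg, PySem.Str.isIn "__" kv.1 = true)
    (hpairs : ((pg.map pvParse).map (fun t => (t.1, t.2.1))).Nodup) :
    param_grid_to_custom_format_py_alt pg =
      (pvEsts (pg.map pvParse)).map (fun e => (e, pvPf (pg.map pvParse) e)) := by
  show (List.map
      (fun est =>
        (est,
          (List.foldl
              (fun d x =>
                match pvUnpack2 x.1 with
                | some (e, param) => if e == est then d.insert param x.2 else d
                | none => d)
              PySem.Dict.empty (pg.map (fun kv => ((PySem.Str.splitMax? kv.1 "__" 1).getD [], kv.2)))).items))
      (List.foldl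
        (fun acc x =>
          match pvUnpack2 x.1 with
          | some (estimator_name, _) => PySem.Set.add acc estimator_name
          | none => acc)
        ([] : PySem.Set String) (pg.map (fun kv => ((PySem.Str.splitMax? kv.1 "__" 1).getD [], kv.2))))) = _
  have hsplit : pg.map (fun kv => ((PySem.Str.splitMax? kv.1 "__" 1).getD [], kv.2))
      = pg.map (fun kv => ([(pvParse kv).1, (pvParse kv).2.1], (pvParse kv).2.2)) := by
    refine List.map_congr_left ?_
    intro kv hkv
    rw [(pv_split_eq kv.1 (hall kv hkv)).1]
    rfl
  rw [hsplit]
  have hests : (pg.map (fun kv => ([(pvParse kv).1, (pvParse kv).2.1], (pvParse kv).2.2))).foldl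
      (fun acc x => match pvUnpack2 x.1 with
        | some (estimator_name, _) => PySem.Set.add acc estimator_name
        | none => acc) ([] : PySem.Set String)
      = pvEsts (pg.map pvParse) := by
    rw [List.foldl_map]
    show pg.foldl (fun acc kv => PySem.Set.add acc (pvParse kv).1) [] = _
    have : pg.foldl (fun acc kv => PySem.Set.add acc (pvParse kv).1) []
        = (pg.map pvParse).foldl (fun acc t => PySem.Set.add acc t.1) [] := by
      rw [List.foldl_map]
    rw [this, ← PySem.Set.update_map_eq_foldl_add]
    show PySem.Set.empty.update _ = _
    rw [PySem.Set.update_empty]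
    rfl
  rw [hests]
  refine List.map_congr_left ?_
  intro e he
  refine Prod.ext rfl ?_
  show (List.foldl _ PySem.Dict.empty _).items = _
  have hinner : (pg.map (fun kv => ([(pvParse kv).1, (pvParse kv).2.1], (pvParse kv).2.2))).foldl
      (fun d x => match pvUnpack2 x.1 with
        | some (e', param) => if e' == e then d.insert param x.2 else d
        | none => d) (PySem.Dict.empty : PySem.Dict String (List Int))
      = (pg.map pvParse).foldl
          (fun d t => if t.1 == e then d.insert t.2.1 t.2.2 else d) PySem.Dict.empty := by
    rw [List.foldl_map, List.foldl_map]
    rfl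
  rw [hinner, pv_B_inner _ _ hpairs]

theorem pv_final : ∀ (pg : List (String × List Int)),
    (pg.all (fun kv => PySem.Str.isIn "__" kv.1)) = true → (pg.map Prod.fst).Nodup →
    param_grid_to_custom_format_py pg = param_grid_to_custom_format_py_alt pg := by
  intro pg hall hnodup
  have hall' : ∀ kv ∈ pg, PySem.Str.isIn "__" kv.1 = true := by
    simpa [List.all_eq_true] using hall
  have hpairs : ((pg.map pvParse).map (fun t => (t.1, t.2.1))).Nodup := by
    rw [List.map_map]
    have hcomp : ((fun t : String × String × List Int => (t.1, t.2.1)) ∘ pvParse)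
        = (fun kv : String × List Int => pvKeyPair kv.1) := by
      funext kv; simp [pvParse, Function.comp]
    rw [hcomp]
    have hmm : pg.map (fun kv : String × List Int => pvKeyPair kv.1)
        = (pg.map Prod.fst).map pvKeyPair := by rw [List.map_map]; rfl
    rw [hmm]
    refine List.Nodup.map_on ?_ hnodup
    intro x hx y hy hxy
    obtain ⟨kx, hkx, hkx1⟩ := List.mem_map.mp hx
    obtain ⟨ky, hky, hky1⟩ := List.mem_map.mp hy
    subst hkx1; subst hky1
    exact pv_keyPair_inj _ _ (hall' kx hkx) (hall' ky hky) hxy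
  exact (pv_A_eq pg hall' hpairs).trans (pv_B_eq pg hall' hpairs).symm

-- ===== VERDICT (by name: the statement is the Claim_ definition above) =====
theorem param_grid_to_custom_format_py_spec : Claim_equal_param_grid_to_custom_format_py := by
  intro pg _hdom hpre
  exact pv_final pg hpre.1 hpre.2
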